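-- pv_equiv track=rewrite | github.com/Valuamba/randevu | src/apps/employee/services/employee_month_time_slots.py | get_free_slots_meets_duration
-- ===== SOURCE A (Python) =====
-- from typing import  Any, Dict, List
--
-- def get_free_slots_meets_duration(work_time_range: List[int], duration = 0):
--     '''This method calculates time slots that meet duration condition
--        For example: duration = 2, slots = [11, 12, 14, 16, 17, 18] then valid slots
--        to create appointment [11, 16, 17]
--     '''
--
--     if duration > 1:
--         count = len(work_time_range)
--         new_work_range = []
--         for i in range(count):
--             counter = 0
--
--             if count < i + duration:
--                 continue
--
--             for j in range(i, i + duration - 1):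
--                 if work_time_range[j + 1] - work_time_range[j] == 1:
--                     counter += 1
--                 else:
--                     break
--
--             if counter >= duration - 1:
--                 new_work_range.append(work_time_range[i])
--
--         return new_work_range
--     else:
--         return work_time_range
-- ===== SOURCE B (Python) =====
-- def get_free_slots_meets_duration(work_time_range, duration=0):
--     if duration <= 1:
--         return work_time_range
--     result = []
--     run = 0
--     prev = None
--     for x in reversed(work_time_range):
--         run = run + 1 if prev is not None and prev - x == 1 else 1
--         if run >= duration:
--             result.append(x)
--         prev = x
--     result.reverse()
--     return result
-- ===== Notes on version B (the rewrite author's own statement) =====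
-- stated objective: faster
-- what changed: Replaces A's nested rescan (for each start index, re-check up to duration-1 consecutive steps) by a single backward pass that computes the consecutive-run length at every position, then keeps the slots whose run length reaches the duration.
import Mathlib
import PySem

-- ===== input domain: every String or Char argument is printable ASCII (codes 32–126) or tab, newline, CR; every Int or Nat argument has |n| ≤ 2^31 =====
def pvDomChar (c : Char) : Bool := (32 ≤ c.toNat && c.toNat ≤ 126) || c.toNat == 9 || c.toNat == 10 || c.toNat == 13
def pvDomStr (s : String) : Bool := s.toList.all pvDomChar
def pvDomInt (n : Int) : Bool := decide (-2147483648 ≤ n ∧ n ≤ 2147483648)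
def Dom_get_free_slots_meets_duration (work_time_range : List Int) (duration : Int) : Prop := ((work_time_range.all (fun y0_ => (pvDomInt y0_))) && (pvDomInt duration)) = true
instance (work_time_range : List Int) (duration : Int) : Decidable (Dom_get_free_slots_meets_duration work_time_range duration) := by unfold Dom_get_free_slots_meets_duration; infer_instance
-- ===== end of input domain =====

-- B replaces A's nested rescans by one backward pass computing consecutive-run lengths (O(n) vs O(n*duration)); objective: faster.


-- ===== PORT A =====
-- literal transliteration of A: outer loop over range(count), `continue` guard,
-- inner counter loop with break (modelled as a fold over (counter, broken)).
def get_free_slots_meets_duration (work_time_range : List Int) (duration : Int) : List Int :=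
  if duration > 1 then
    (PySem.List.pyRange 0 (work_time_range.length : Int) 1).foldl (fun acc i =>
      if (work_time_range.length : Int) < i + duration then acc
      else
        if ((PySem.List.pyRange i (i + duration - 1) 1).foldl
          (fun (s : Int × Bool) j =>
            if s.2 then s
            else if PySem.List.pyGetD work_time_range (j + 1) 0 - PySem.List.pyGetD work_time_range j 0 = 1 then (s.1 + 1, s.2)
            else (s.1, true)) ((0 : Int), false)).1 ≥ duration - 1
        then acc ++ [PySem.List.pyGetD work_time_range i 0] else acc) []
  else work_time_range

-- ===== PORT B =====
-- transliteration of Source B: one pass over reversed(work_time_range) maintaining the current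
-- consecutive-run length, collecting qualifying slots, reversed at the end.
def get_free_slots_meets_duration_alt (work_time_range : List Int) (duration : Int) : List Int :=
  if duration ≤ 1 then work_time_range
  else
    (work_time_range.reverse.foldl
      (fun (s : List Int × Int × Option Int) x =>
        let run : Int := match s.2.2 with
          | some prev => if prev - x = 1 then s.2.1 + 1 else 1
          | none => 1
        (if duration ≤ run then s.1 ++ [x] else s.1, run, some x)) ([], 0, none)).1.reverse

-- ===== PRECONDITION & SPEC =====
def Spec_get_free_slots_meets_duration (work_time_range : List Int) (duration : Int) (out : List Int) : Prop := out = get_free_slots_meets_duration_alt work_time_range duration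
instance (work_time_range : List Int) (duration : Int) (out : List Int) : Decidable (Spec_get_free_slots_meets_duration work_time_range duration out) := by unfold Spec_get_free_slots_meets_duration; infer_instance

-- ===== CLAIM (what is proved, stated in full; the proofs are below) =====
def Claim_equal_get_free_slots_meets_duration : Prop := ∀ (work_time_range : List Int) (duration : Int), Dom_get_free_slots_meets_duration work_time_range duration → Spec_get_free_slots_meets_duration work_time_range duration (get_free_slots_meets_duration work_time_range duration)

-- ===== LEMMAS AND PROOFS =====

-- Reference form of B's run lengths: structural recursion from the head.
def pvRunsRec : List Int → List Int
  | [] => []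
  | [_] => [1]
  | x :: y :: t => (if y - x = 1 then (pvRunsRec (y :: t)).headD 0 + 1 else 1) :: pvRunsRec (y :: t)

-- B's reverse-fold collects, in reverse, the slots whose run length reaches duration.
theorem pv_fold_alt (w : List Int) (d : Int) :
    w.reverse.foldl
      (fun (s : List Int × Int × Option Int) x =>
        let run : Int := match s.2.2 with
          | some prev => if prev - x = 1 then s.2.1 + 1 else 1
          | none => 1
        (if d ≤ run then s.1 ++ [x] else s.1, run, some x)) ([], 0, none)
    = ((((w.zip (pvRunsRec w)).filter (fun p => decide (d ≤ p.2))).map (fun p => p.1)).reverse,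
       (pvRunsRec w).headD 0, w.head?) := by
  induction w with
  | nil => rfl
  | cons x t ih =>
    rw [List.reverse_cons, List.foldl_append, ih]
    cases t with
    | nil =>
      simp only [List.foldl_cons, List.foldl_nil, pvRunsRec, List.zip_cons_cons, List.zip_nil_left,
        List.headD_cons, List.head?_cons, List.filter_cons, List.filter_nil]
      by_cases hd : d ≤ 1 <;> simp [hd]
    | cons y t' =>
      simp only [List.foldl_cons, List.foldl_nil, List.head?_cons, pvRunsRec, List.headD_cons,
        List.zip_cons_cons, List.filter_cons]
      by_cases h1 : y - x = 1
      · simp only [h1, if_pos rfl, if_true]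
        by_cases h2 : d ≤ (pvRunsRec (y :: t')).headD 0 + 1 <;>
          simp only [List.headD_eq_head?_getD] at h2 <;> simp [h2]
      · simp only [h1, if_neg h1]
        by_cases h2 : d ≤ (1 : Int) <;> simp [h2]

theorem pvRunsRec_length (w : List Int) : (pvRunsRec w).length = w.length := by
  induction w with
  | nil => rfl
  | cons x t ih =>
    cases t with
    | nil => rfl
    | cons y t' => simp only [pvRunsRec, List.length_cons] at ih ⊢; omega

theorem pvRunsRec_head_pos (w : List Int) (h : w ≠ []) : 1 ≤ (pvRunsRec w).headD 0 := by
  cases w with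
  | nil => exact absurd rfl h
  | cons x t =>
    cases t with
    | nil => simp [pvRunsRec]
    | cons y t' =>
      have ht : (y :: t') ≠ ([] : List Int) := by simp
      have := pvRunsRec_head_pos (y :: t') ht
      simp only [pvRunsRec, List.headD_cons]
      split <;> omega

-- characterization of the head run length
theorem pv_headRun_ge (w : List Int) (k : Nat) (hk : 1 ≤ k) :
    ((k : Int) ≤ (pvRunsRec w).headD 0) ↔
      (k ≤ w.length ∧ ∀ j : Nat, j < k - 1 → w.getD (j+1) 0 - w.getD j 0 = 1) := by
  induction w generalizing k with
  | nil =>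
    simp only [pvRunsRec, List.headD_nil, List.length_nil]
    constructor
    · intro h; exfalso; omega
    · rintro ⟨h, _⟩; omega
  | cons x t ih =>
    cases t with
    | nil =>
      simp only [pvRunsRec, List.headD_cons, List.length_cons, List.length_nil]
      constructor
      · intro h
        have hk1 : k = 1 := by omega
        subst hk1; exact ⟨by omega, by intro j hj; omega⟩
      · rintro ⟨h1, _⟩; omega
    | cons y t' =>
      rcases Nat.exists_eq_add_of_le hk with ⟨m, hm⟩
      subst hm
      rcases Nat.eq_zero_or_pos m with h0 | hmpos
      · subst h0
        have hpos := pvRunsRec_head_pos (x :: y :: t') (by simp)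
        simp only [List.length_cons]
        constructor
        · intro _; exact ⟨by omega, by intro j hj; omega⟩
        · intro _; exact_mod_cast hpos
      · simp only [pvRunsRec, List.headD_cons, List.length_cons]
        by_cases hd : y - x = 1
        · rw [if_pos hd]
          have ihm := ih m hmpos
          constructor
          · intro h
            have hm' : (m : Int) ≤ (pvRunsRec (y :: t')).headD 0 := by push_cast at h ⊢; omega
            obtain ⟨hlen, hall⟩ := ihm.mp hm'
            refine ⟨by simp only [List.length_cons] at hlen ⊢; omega, ?_⟩
            intro j hj
            cases j with
            | zero => simpa using hd
            | succ i =>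
              have hi := hall i (by omega)
              simpa using hi
          · rintro ⟨hlen, hall⟩
            have h1 : (m : Int) ≤ (pvRunsRec (y :: t')).headD 0 := by
              apply ihm.mpr
              refine ⟨by simp only [List.length_cons] at hlen ⊢; omega, ?_⟩
              intro i hi
              have hii := hall (i+1) (by omega)
              simpa using hii
            push_cast
            omega
        · rw [if_neg hd]
          constructor
          · intro h; exfalso; push_cast at h; omega
          · rintro ⟨hlen, hall⟩
            exfalso
            have h0 := hall 0 (by omega)
            simp only [List.getD_cons_succ, List.getD_cons_zero, zero_add] at h0
            exact hd h0

-- inner break-loop shape: fold over any list with a (counter, broken) state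
theorem pv_break_fold (p : Int → Prop) [DecidablePred p] (l : List Int) (c : Int) :
    l.foldl (fun (s : Int × Bool) j =>
        if s.2 then s
        else if p j then (s.1 + 1, s.2)
        else (s.1, true)) (c, false)
      = (c + ((l.takeWhile (fun j => decide (p j))).length : Int), !l.all (fun j => decide (p j))) := by
  induction l generalizing c with
  | nil => simp
  | cons a l ih =>
    by_cases hp : p a
    · simp only [List.foldl_cons, hp, Bool.false_eq_true, if_false, if_true]
      rw [ih (c + 1)]
      simp [hp]
      omega
    · simp only [List.foldl_cons, hp, Bool.false_eq_true, if_false]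
      have hfix : ∀ (m : List Int) (c' : Int),
          m.foldl (fun (s : Int × Bool) j =>
            if s.2 then s else if p j then (s.1 + 1, s.2) else (s.1, true)) (c', true) = (c', true) := by
        intro m
        induction m with
        | nil => intro c'; rfl
        | cons b m ihm => intro c'; simpa using ihm c'
      rw [hfix]
      simp [hp]

theorem pv_getD_drop (l : List Int) (m n : Nat) : (l.drop m).getD n 0 = l.getD (m + n) 0 := by
  simp [List.getD_eq_getElem?_getD, List.getElem?_drop]

theorem pvRunsRec_getD (w : List Int) (i : Nat) (h : i < w.length) :
    (pvRunsRec w).getD i 0 = (pvRunsRec (w.drop i)).headD 0 := by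
  induction w generalizing i with
  | nil => simp at h
  | cons x t ih =>
    cases i with
    | zero => cases t <;> simp [pvRunsRec]
    | succ n =>
      have hlt : n < t.length := by simpa using h
      cases t with
      | nil => simp at hlt
      | cons y t' =>
        simp only [pvRunsRec, List.getD_cons_succ, List.drop_succ_cons]
        exact ih n hlt

-- the inner counter reaching d-1 says exactly: every step in [i, i+d-1) is consecutive
theorem pv_counter_iff (w : List Int) (d i : Int) (hd : 1 < d) :
    (d - 1 ≤ (((PySem.List.pyRange i (i + d - 1) 1).takeWhile
        (fun j => decide (PySem.List.pyGetD w (j + 1) 0 - PySem.List.pyGetD w j 0 = 1))).length : Int))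
    ↔ ∀ j : Int, i ≤ j → j < i + d - 1 → PySem.List.pyGetD w (j + 1) 0 - PySem.List.pyGetD w j 0 = 1 := by
  have hlen : (PySem.List.pyRange i (i + d - 1) 1).length = (d - 1).toNat := by
    rw [PySem.List.length_pyRange_one]
    congr 1
    ring
  have hle := (List.takeWhile_prefix
    (fun j => decide (PySem.List.pyGetD w (j + 1) 0 - PySem.List.pyGetD w j 0 = 1))
    (l := PySem.List.pyRange i (i + d - 1) 1)).length_le
  constructor
  · intro h
    have heq : (List.takeWhile (fun j => decide (PySem.List.pyGetD w (j + 1) 0 - PySem.List.pyGetD w j 0 = 1)) (PySem.List.pyRange i (i + d - 1) 1)).length = (PySem.List.pyRange i (i + d - 1) 1).length := by omega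
    have hself := (List.takeWhile_prefix _).eq_of_length heq
    have hall := List.takeWhile_eq_self_iff.mp hself
    intro j hj1 hj2
    have hj := hall j (PySem.List.mem_pyRange_one.mpr ⟨hj1, by omega⟩)
    simpa using hj
  · intro h
    have hself : List.takeWhile (fun j => decide (PySem.List.pyGetD w (j + 1) 0 - PySem.List.pyGetD w j 0 = 1)) (PySem.List.pyRange i (i + d - 1) 1) = PySem.List.pyRange i (i + d - 1) 1 := by
      apply List.takeWhile_eq_self_iff.mpr
      intro x hx
      obtain ⟨h1, h2⟩ := PySem.List.mem_pyRange_one.mp hx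
      simpa using h x h1 h2
    rw [hself, hlen]
    omega

-- A's per-index condition equals B's run-length condition
theorem pv_cond_iff (w : List Int) (d : Int) (hd : 1 < d) (i : Int) (hi0 : 0 ≤ i) (hi1 : i < (w.length : Int)) :
    (¬ ((w.length : Int) < i + d) ∧ ∀ j : Int, i ≤ j → j < i + d - 1 → PySem.List.pyGetD w (j + 1) 0 - PySem.List.pyGetD w j 0 = 1)
    ↔ d ≤ (pvRunsRec w).getD i.toNat 0 := by
  rw [pvRunsRec_getD w i.toNat (by omega)]
  have hk := pv_headRun_ge (w.drop i.toNat) d.toNat (by omega)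
  have hd' : ((d.toNat : Nat) : Int) = d := by omega
  rw [hd'] at hk
  rw [hk]
  have hlen : (w.drop i.toNat).length = w.length - i.toNat := List.length_drop
  constructor
  · rintro ⟨h1, h2⟩
    constructor
    · rw [hlen]; omega
    · intro j hj
      have hjj := h2 ((i.toNat + j : Nat) : Int) (by omega) (by omega)
      have e1 : ((i.toNat + j : Nat) : Int) + 1 = ((i.toNat + j + 1 : Nat) : Int) := by push_cast; ring
      rw [e1, PySem.List.pyGetD_natCast, PySem.List.pyGetD_natCast] at hjj
      rw [pv_getD_drop, pv_getD_drop]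
      have e2 : i.toNat + (j + 1) = i.toNat + j + 1 := by omega
      rw [e2]
      exact hjj
  · rintro ⟨h1, h2⟩
    rw [hlen] at h1
    refine ⟨by omega, ?_⟩
    intro j hj1 hj2
    have hjn : j = ((j.toNat : Nat) : Int) := by omega
    have hsub := h2 (j.toNat - i.toNat) (by omega)
    rw [pv_getD_drop, pv_getD_drop] at hsub
    have e2 : i.toNat + (j.toNat - i.toNat) = j.toNat := by omega
    rw [e2] at hsub
    rw [hjn]
    have e1 : ((j.toNat : Nat) : Int) + 1 = ((j.toNat + 1 : Nat) : Int) := by push_cast; ring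
    rw [e1, PySem.List.pyGetD_natCast, PySem.List.pyGetD_natCast]
    have e3 : i.toNat + (j.toNat - i.toNat + 1) = j.toNat + 1 := by omega
    rw [e3] at hsub
    exact hsub

-- A's loop as filter-map over the index range, with B's run condition
theorem pv_A_fold (w : List Int) (d : Int) (hd : 1 < d) :
    get_free_slots_meets_duration w d
      = ((PySem.List.pyRange 0 (w.length : Int) 1).filter
          (fun i => decide (d ≤ (pvRunsRec w).getD i.toNat 0))).map (fun i => PySem.List.pyGetD w i 0) := by
  unfold get_free_slots_meets_duration
  rw [if_pos hd]
  have hpt : ∀ (acc : List Int), ∀ i ∈ PySem.List.pyRange 0 ((w.length : Int)) 1,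
      (if (w.length : Int) < i + d then acc
       else
        if ((PySem.List.pyRange i (i + d - 1) 1).foldl
          (fun (s : Int × Bool) j =>
            if s.2 then s
            else if PySem.List.pyGetD w (j + 1) 0 - PySem.List.pyGetD w j 0 = 1 then (s.1 + 1, s.2)
            else (s.1, true)) ((0 : Int), false)).1 ≥ d - 1
        then acc ++ [PySem.List.pyGetD w i 0] else acc)
      = (if d ≤ (pvRunsRec w).getD i.toNat 0 then acc ++ [PySem.List.pyGetD w i 0] else acc) := by
    intro acc i hi
    obtain ⟨hi0, hi1⟩ := PySem.List.mem_pyRange_one.mp hi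
    by_cases h1 : (w.length : Int) < i + d
    · rw [if_pos h1, if_neg]
      intro hle
      exact ((pv_cond_iff w d hd i hi0 hi1).mpr hle).1 h1
    · rw [if_neg h1,
        pv_break_fold (fun j => PySem.List.pyGetD w (j + 1) 0 - PySem.List.pyGetD w j 0 = 1)]
      dsimp only
      have hiff : (0 + (((PySem.List.pyRange i (i + d - 1) 1).takeWhile
            (fun j => decide (PySem.List.pyGetD w (j + 1) 0 - PySem.List.pyGetD w j 0 = 1))).length : Int) ≥ d - 1)
          ↔ d ≤ (pvRunsRec w).getD i.toNat 0 := by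
        rw [show ∀ a : Int, (0 + a ≥ d - 1) ↔ (d - 1 ≤ a) from fun a => by omega]
        exact (pv_counter_iff w d i hd).trans
          ⟨fun hall => (pv_cond_iff w d hd i hi0 hi1).mp ⟨h1, hall⟩,
           fun hle => ((pv_cond_iff w d hd i hi0 hi1).mpr hle).2⟩
      rw [if_congr hiff rfl rfl]
  refine (PySem.List.foldl_congr_mem _ _ _ _ hpt).trans ?_
  rw [PySem.List.foldl_append_ite (fun i => d ≤ (pvRunsRec w).getD i.toNat 0) (fun i => PySem.List.pyGetD w i 0)]
  simp

-- index-filter form equals zip-filter form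
theorem pv_zip_form (w rs : List Int) (q : Int → Prop) [DecidablePred q] (h : rs.length = w.length) :
    ((List.range w.length).filter (fun i => decide (q (rs.getD i 0)))).map (fun i => w.getD i 0)
    = ((w.zip rs).filter (fun p => decide (q p.2))).map (fun p => p.1) := by
  induction w generalizing rs with
  | nil => simp
  | cons x t ih =>
    cases rs with
    | nil => simp at h
    | cons r rt =>
      have h' : rt.length = t.length := by simpa using h
      have hrec : ((List.range t.length).filter
            (fun i => decide (q ((r :: rt).getD (i + 1) 0)))).map (fun i => (x :: t).getD (i + 1) 0)
          = ((t.zip rt).filter (fun p => decide (q p.2))).map (fun p => p.1) := by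
        have hih := ih rt h'
        simpa using hih
      rw [List.length_cons, List.range_succ_eq_map, List.zip_cons_cons]
      rw [List.filter_cons, List.filter_cons]
      dsimp only [List.getD_cons_zero]
      by_cases hq : q r
      · simp only [List.getD_cons_zero, decide_eq_true hq, if_true, List.map_cons,
          List.filter_map, List.map_map, Function.comp_def, Nat.succ_eq_add_one]
        exact congrArg (List.cons x) hrec
      · simp only [List.getD_cons_zero, decide_eq_false hq, Bool.false_eq_true, if_false,
          List.filter_map, List.map_map, Function.comp_def, Nat.succ_eq_add_one]
        exact hrec

theorem get_free_slots_meets_duration_spec : Claim_equal_get_free_slots_meets_duration := by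
  unfold Claim_equal_get_free_slots_meets_duration Spec_get_free_slots_meets_duration
  intro w d _
  by_cases hd : 1 < d
  · rw [pv_A_fold w d hd]
    unfold get_free_slots_meets_duration_alt
    rw [if_neg (by omega)]
    rw [pv_fold_alt]
    simp only [List.reverse_reverse]
    rw [PySem.List.pyRange_zero_nat, List.filter_map, List.map_map]
    have hz := pv_zip_form w (pvRunsRec w) (fun r => d ≤ r) (pvRunsRec_length w)
    simpa [Function.comp_def, ge_iff_le] using hz
  · unfold get_free_slots_meets_duration get_free_slots_meets_duration_alt
    rw [if_neg hd, if_pos (by omega)]
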